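-- pv_equiv track=rewrite | github.com/bw5io/aoc2023 | day16/sol_1.py | ignite
-- ===== SOURCE A (Python) =====
-- direction_dict = {
--   'S': (0, 1),
--   'N': (0, -1),
--   'W': (-1, 0),
--   'E': (1, 0)
-- }
--
-- def ignite(matrix, final_matrix, pos_x=0, pos_y=0, direction='E'):
--     if pos_y not in range(len(matrix)) or pos_x not in range(len(matrix[pos_y])) or direction in final_matrix[pos_y][pos_x]:
--         return final_matrix
--     next_directions = identify_next_direction(matrix[pos_y][pos_x], direction)
--     final_matrix[pos_y][pos_x].append(direction)
--     for next_direction in next_directions: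
--         step_x, step_y = direction_dict[next_direction]
--         final_matrix = ignite(matrix, final_matrix, pos_x+step_x, pos_y+step_y, next_direction)
--     return final_matrix
--
-- def identify_next_direction(symbol, direction):
--     next_directions = []
--     if symbol == '.':
--         next_directions.append(direction)
--     elif symbol =="\\":
--         if direction == "N":
--             next_directions.append("W")
--         elif direction == "W":
--             next_directions.append("N")
--         elif direction == "S":
--             next_directions.append("E")
--         elif direction == "E":
--             next_directions.append("S")
--     elif symbol == "/":
--         if direction == "N":
--             next_directions.append("E")
--         elif direction == "W":
--             next_directions.append("S")
--         elif direction == "S":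
--             next_directions.append("W")
--         elif direction == "E":
--             next_directions.append("N")
--     elif symbol == "|":
--         if direction in ['S', 'N']:
--             next_directions.append(direction)
--         elif direction in ['E', 'W']:
--             next_directions.append('S')
--             next_directions.append('N')
--     elif symbol == "-":
--         if direction in ['S', 'N']:
--             next_directions.append('E')
--             next_directions.append('W')
--         elif direction in ['E', 'W']:
--             next_directions.append(direction)
--     return next_directions
-- ===== SOURCE B (Python) =====
-- STEP = {'S': (0, 1), 'N': (0, -1), 'W': (-1, 0), 'E': (1, 0)}
--
-- # full transition table: (symbol, direction) -> outgoing directions; '.' passes the beam through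
-- TABLE = {
--     ('\\', 'N'): ['W'], ('\\', 'W'): ['N'], ('\\', 'S'): ['E'], ('\\', 'E'): ['S'],
--     ('/', 'N'): ['E'], ('/', 'W'): ['S'], ('/', 'S'): ['W'], ('/', 'E'): ['N'],
--     ('|', 'N'): ['N'], ('|', 'S'): ['S'], ('|', 'E'): ['S', 'N'], ('|', 'W'): ['S', 'N'],
--     ('-', 'E'): ['E'], ('-', 'W'): ['W'], ('-', 'S'): ['E', 'W'], ('-', 'N'): ['E', 'W'],
-- }
--
-- def next_dirs(symbol, direction):
--     if symbol == '.':
--         return [direction]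
--     return TABLE.get((symbol, direction), [])
--
-- def ignite(matrix, final_matrix, pos_x=0, pos_y=0, direction='E'):
--     # iterative agenda loop (head of the list = next beam state), table-driven transitions
--     agenda = [(pos_x, pos_y, direction)]
--     while agenda:
--         (x, y, d), agenda = agenda[0], agenda[1:]
--         if 0 <= y < len(matrix) and 0 <= x < len(matrix[y]) and d not in final_matrix[y][x]:
--             final_matrix[y][x].append(d)
--             agenda = [(x + STEP[nd][0], y + STEP[nd][1], nd)
--                       for nd in next_dirs(matrix[y][x], d)] + agenda
--     return final_matrix
-- ===== Notes on version B (the rewrite author's own statement) =====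
-- stated objective: alternative
-- what changed: The recursive DFS is replaced by an iterative agenda loop over a head-popped worklist of (x, y, direction) states (successors prepended to keep the recursion's preorder), and the if/elif cascade identify_next_direction is replaced by a single table-driven lookup dict keyed by (symbol, direction).
-- outside the precondition, e.g. on ignite([['.'], ['\\']], [[[]]], 0, 0, 'E'): A returns [[['E']]], B returns [[['E']]]
import Mathlib
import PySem

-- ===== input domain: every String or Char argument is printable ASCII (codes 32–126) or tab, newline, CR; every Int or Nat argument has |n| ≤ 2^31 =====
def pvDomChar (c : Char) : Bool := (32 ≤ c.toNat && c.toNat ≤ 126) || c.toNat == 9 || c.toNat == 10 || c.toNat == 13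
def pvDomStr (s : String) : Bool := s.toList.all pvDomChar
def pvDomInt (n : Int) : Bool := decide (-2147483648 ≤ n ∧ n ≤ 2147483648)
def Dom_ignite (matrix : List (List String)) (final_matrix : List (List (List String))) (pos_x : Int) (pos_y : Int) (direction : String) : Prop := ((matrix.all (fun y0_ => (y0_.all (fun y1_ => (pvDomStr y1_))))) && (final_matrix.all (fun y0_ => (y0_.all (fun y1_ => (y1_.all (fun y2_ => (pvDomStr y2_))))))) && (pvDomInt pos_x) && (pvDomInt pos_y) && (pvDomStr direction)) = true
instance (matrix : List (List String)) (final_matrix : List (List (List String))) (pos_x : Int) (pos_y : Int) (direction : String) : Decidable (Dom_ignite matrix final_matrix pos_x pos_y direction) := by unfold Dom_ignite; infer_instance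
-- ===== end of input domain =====

-- B replaces the recursive DFS by an iterative agenda loop (head-popped worklist, successors
-- prepended to keep the recursion's preorder) with a table-driven transition dict; same return
-- value on Pre_ (A and B both mutate final_matrix in place in Python; the claim is about the
-- returned value).


-- ===== PORT A =====
-- 'direction_dict[nd]' as an option-valued lookup: none is exactly Python's KeyError (excluded by Pre_ below)
def dirStep? (d : String) : Option (Int × Int) :=
  if d = "S" then some (0, 1)
  else if d = "N" then some (0, -1)
  else if d = "W" then some (-1, 0)
  else if d = "E" then some (1, 0)
  else none

-- transliteration of identify_next_direction (the appends are written as the list literals they build)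
def identifyNext (symbol : String) (direction : String) : List String :=
  if symbol = "." then [direction]
  else if symbol = "\\" then
    if direction = "N" then ["W"]
    else if direction = "W" then ["N"]
    else if direction = "S" then ["E"]
    else if direction = "E" then ["S"]
    else []
  else if symbol = "/" then
    if direction = "N" then ["E"]
    else if direction = "W" then ["S"]
    else if direction = "S" then ["W"]
    else if direction = "E" then ["N"]
    else []
  else if symbol = "|" then
    if direction = "S" ∨ direction = "N" then [direction]
    else if direction = "E" ∨ direction = "W" then ["S", "N"]
    else []
  else if symbol = "-" then
    if direction = "S" ∨ direction = "N" then ["E", "W"]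
    else if direction = "E" ∨ direction = "W" then [direction]
    else []
  else []

def cellAt (fm : List (List (List String))) (y x : Nat) : List String :=
  (fm.getD y []).getD x []

def symAt (m : List (List String)) (y x : Nat) : String :=
  (m.getD y []).getD x ""

-- A's guard: pos_y not in range(len(matrix)) or pos_x not in range(len(matrix[pos_y])) or direction in final_matrix[pos_y][pos_x]
-- (.toNat is exact here: it is only relevant once the preceding range tests put the index in [0, len))
def blocked (m : List (List String)) (fm : List (List (List String))) (x y : Int) (d : String) : Bool :=
  decide (y < 0) || decide ((m.length : Int) ≤ y) || decide (x < 0)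
    || decide (((m.getD y.toNat []).length : Int) ≤ x) || decide (d ∈ cellAt fm y.toNat x.toNat)

-- final_matrix[pos_y][pos_x].append(direction) as a pure update
def appendAt (fm : List (List (List String))) (y x : Nat) (d : String) : List (List (List String)) :=
  fm.set y ((fm.getD y []).set x (cellAt fm y x ++ [d]))

-- fuel bound for the recursion: number of (cell, N/S/E/W-direction) pairs not yet recorded
def missing (c : List String) : Nat :=
  (if "S" ∈ c then 0 else 1) + (if "N" ∈ c then 0 else 1)
    + (if "W" ∈ c then 0 else 1) + (if "E" ∈ c then 0 else 1)

def mu (fm : List (List (List String))) : Nat :=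
  ∑ i ∈ Finset.range fm.length, ∑ j ∈ Finset.range (fm.getD i []).length, missing (cellAt fm i j)

-- A's recursion; fuel is only a totality device (mu fm + 1 is proved sufficient below)
mutual
def igniteF : Nat → List (List String) → List (List (List String)) → Int → Int → String → List (List (List String))
  | 0, _, fm, _, _, _ => fm
  | fuel + 1, m, fm, x, y, d =>
    if blocked m fm x y d then fm
    else
      igniteList fuel m (identifyNext (symAt m y.toNat x.toNat) d)
        (appendAt fm y.toNat x.toNat d) x y
termination_by fuel _ _ _ _ _ => (fuel, 0)

-- the 'for next_direction in next_directions' loop of A, threading final_matrix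
def igniteList : Nat → List (List String) → List String → List (List (List String)) → Int → Int → List (List (List String))
  | _, _, [], fm, _, _ => fm
  | fuel, m, nd :: rest, fm, x, y =>
    let fm2 :=
      match dirStep? nd with
      | some s => igniteF fuel m fm (x + s.1) (y + s.2) nd
      | none => fm
    igniteList fuel m rest fm2 x y
termination_by fuel _ l _ _ _ => (fuel, l.length + 1)
end

def ignite (matrix : List (List String)) (final_matrix : List (List (List String))) (pos_x : Int) (pos_y : Int) (direction : String) : List (List (List String)) :=
  igniteF (mu final_matrix + 1) matrix final_matrix pos_x pos_y direction

-- ===== PORT B =====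
-- Source B's STEP dict; .get? none is Python's KeyError (unreachable inside Pre_)
def stepB : PySem.Dict String (Int × Int) :=
  PySem.Dict.mk [("S", (0, 1)), ("N", (0, -1)), ("W", (-1, 0)), ("E", (1, 0))]

-- Source B's TABLE: full (symbol, direction) → outgoing-directions transition table
def tableB : PySem.Dict (String × String) (List String) :=
  PySem.Dict.mk
    [ (("\\", "N"), ["W"]), (("\\", "W"), ["N"]), (("\\", "S"), ["E"]), (("\\", "E"), ["S"]),
      (("/", "N"), ["E"]), (("/", "W"), ["S"]), (("/", "S"), ["W"]), (("/", "E"), ["N"]),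
      (("|", "N"), ["N"]), (("|", "S"), ["S"]), (("|", "E"), ["S", "N"]), (("|", "W"), ["S", "N"]),
      (("-", "E"), ["E"]), (("-", "W"), ["W"]), (("-", "S"), ["E", "W"]), (("-", "N"), ["E", "W"]) ]

def nextDirs (symbol direction : String) : List String :=
  if symbol = "." then [direction]
  else PySem.Dict.getD tableB (symbol, direction) []

-- Source B's while-loop over the agenda (head = next state); fuel is only a totality device
-- (the bound used in ignite_alt is proved sufficient below)
def igniteGo : Nat → List (List String) → List (Int × Int × String) → List (List (List String)) → List (List (List String))
  | 0, _, _, fm => fm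
  | _ + 1, _, [], fm => fm
  | fuel + 1, m, (x, y, d) :: rest, fm =>
    if 0 ≤ y ∧ y < (m.length : Int) ∧ 0 ≤ x ∧ x < ((m.getD y.toNat []).length : Int)
        ∧ d ∉ (fm.getD y.toNat []).getD x.toNat [] then
      igniteGo fuel m
        (((nextDirs ((m.getD y.toNat []).getD x.toNat "") d).filterMap
            (fun nd => (PySem.Dict.get? stepB nd).map (fun s => (x + s.1, y + s.2, nd)))) ++ rest)
        (fm.mapIdx (fun i row => if i = y.toNat then
            row.mapIdx (fun j c => if j = x.toNat then c ++ [d] else c) else row))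
    else igniteGo fuel m rest fm

def ignite_alt (matrix : List (List String)) (final_matrix : List (List (List String))) (pos_x : Int) (pos_y : Int) (direction : String) : List (List (List String)) :=
  igniteGo (1 + 8 * (final_matrix.map (fun r => r.length)).sum) matrix
    [(pos_x, pos_y, direction)] final_matrix

-- ===== PRECONDITION & SPEC =====
def inStart (m : List (List String)) (x y : Int) : Prop :=
  0 ≤ y ∧ y < (m.length : Int) ∧ 0 ≤ x ∧ x < ((m.getD y.toNat []).length : Int)

def Shape (m : List (List String)) (fm : List (List (List String))) : Prop :=
  m.length ≤ fm.length ∧ ∀ i, i < m.length → (m.getD i []).length ≤ (fm.getD i []).length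

-- Pre_ excludes inputs on which A raises: an IndexError when final_matrix is narrower than some
-- matrix cell the beam may reach (Shape over-approximates reachability, so it also excludes some
-- inputs whose unreachable cells are missing, on which A returns), and the KeyError when the start
-- cell holds '.' and the start direction is not a direction_dict key.
def Pre_ignite (matrix : List (List String)) (final_matrix : List (List (List String))) (pos_x : Int) (pos_y : Int) (direction : String) : Prop :=
  inStart matrix pos_x pos_y →
    (Shape matrix final_matrix ∧
      ¬(dirStep? direction = none ∧ symAt matrix pos_y.toNat pos_x.toNat = "." ∧
        direction ∉ cellAt final_matrix pos_y.toNat pos_x.toNat))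
instance (matrix : List (List String)) (final_matrix : List (List (List String))) (pos_x : Int) (pos_y : Int) (direction : String) : Decidable (Pre_ignite matrix final_matrix pos_x pos_y direction) := by
  unfold Pre_ignite inStart Shape; infer_instance

def pvWitness_ignite : List (List String) × List (List (List String)) × Int × Int × String :=
  ([[".", "."]], [[[], []]], 0, 0, "E")

def Spec_ignite (matrix : List (List String)) (final_matrix : List (List (List String))) (pos_x : Int) (pos_y : Int) (direction : String) (out : List (List (List String))) : Prop := out = ignite_alt matrix final_matrix pos_x pos_y direction
instance (matrix : List (List String)) (final_matrix : List (List (List String))) (pos_x : Int) (pos_y : Int) (direction : String) (out : List (List (List String))) : Decidable (Spec_ignite matrix final_matrix pos_x pos_y direction out) := by unfold Spec_ignite; infer_instance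

-- ===== CLAIM (what is proved, stated in full; the proofs are below) =====
def Claim_equal_ignite : Prop := ∀ (matrix : List (List String)) (final_matrix : List (List (List String))) (pos_x : Int) (pos_y : Int) (direction : String), Dom_ignite matrix final_matrix pos_x pos_y direction → Pre_ignite matrix final_matrix pos_x pos_y direction → Spec_ignite matrix final_matrix pos_x pos_y direction (ignite matrix final_matrix pos_x pos_y direction)

-- ===== LEMMAS AND PROOFS =====

-- proof-only reference loop: A's recursion linearised on an explicit stack (neither port's code)
def igniteLoop : Nat → List (List String) → List (Int × Int × String) → List (List (List String)) → List (List (List String))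
  | 0, _, _, fm => fm
  | _ + 1, _, [], fm => fm
  | fuel + 1, m, (x, y, d) :: rest, fm =>
    if blocked m fm x y d then igniteLoop fuel m rest fm
    else
      igniteLoop fuel m
        (((identifyNext (symAt m y.toNat x.toNat) d).filterMap
            (fun nd => (dirStep? nd).map (fun s => (x + s.1, y + s.2, nd)))) ++ rest)
        (appendAt fm y.toNat x.toNat d)

def R (m : List (List String)) (fm : List (List (List String))) (x y : Int) (d : String) : List (List (List String)) :=
  igniteF (mu fm + 1) m fm x y d

def Lloop (m : List (List String)) (stack : List (Int × Int × String)) (fm : List (List (List String))) : List (List (List String)) :=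
  igniteLoop (stack.length + 2 * mu fm) m stack fm

def statesOf (l : List String) (x y : Int) : List (Int × Int × String) :=
  l.filterMap (fun nd => (dirStep? nd).map (fun s => (x + s.1, y + s.2, nd)))

theorem ilist_nil (f : Nat) (m : List (List String)) (fm : List (List (List String))) (x y : Int) :
    igniteList f m [] fm x y = fm := by rw [igniteList]

theorem go_zero (m : List (List String)) (fm : List (List (List String))) (x y : Int) (d : String) :
    igniteF 0 m fm x y d = fm := by rw [igniteF]

theorem dirStep?_none_iff (d : String) :
    dirStep? d = none ↔ d ≠ "S" ∧ d ≠ "N" ∧ d ≠ "W" ∧ d ≠ "E" := by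
  unfold dirStep?; split_ifs <;> simp_all

theorem dead_next {d : String} (h : dirStep? d = none) (s : String) :
    ∀ nd ∈ identifyNext s d, dirStep? nd = none := by
  intro nd hm
  rw [dirStep?_none_iff] at h
  obtain ⟨h1, h2, h3, h4⟩ := h
  unfold identifyNext at hm
  split_ifs at hm <;> simp_all [dirStep?_none_iff]

theorem identifyNext_len (s d : String) : (identifyNext s d).length ≤ 2 := by
  unfold identifyNext; split_ifs <;> simp

theorem loop_nil (f : Nat) (m : List (List String)) (fm : List (List (List String))) :
    igniteLoop f m [] fm = fm := by
  cases f <;> rfl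

theorem dead_ilist (f : Nat) (m : List (List String)) (l : List String)
    (fm : List (List (List String))) (x y : Int) (h : ∀ nd ∈ l, dirStep? nd = none) :
    igniteList f m l fm x y = fm := by
  induction l with
  | nil => exact ilist_nil f m fm x y
  | cons nd rest ih =>
    have hnd := h nd (by simp)
    rw [igniteList]
    simp only [hnd]
    exact ih (fun a ha => h a (by simp [ha]))

theorem dead_states (l : List String) (x y : Int) (h : ∀ nd ∈ l, dirStep? nd = none) :
    statesOf l x y = [] := by
  simp only [statesOf, List.filterMap_eq_nil_iff]
  intro a ha; simp [h a ha]

theorem statesOf_len (l : List String) (x y : Int) : (statesOf l x y).length ≤ l.length := by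
  simpa [statesOf] using List.length_filterMap_le _ l

def Lens (a b : List (List (List String))) : Prop :=
  a.length = b.length ∧ ∀ i, (a.getD i []).length = (b.getD i []).length

theorem lens_refl (a : List (List (List String))) : Lens a a := ⟨rfl, fun _ => rfl⟩

theorem lens_trans {a b c : List (List (List String))} (h1 : Lens a b) (h2 : Lens b c) : Lens a c :=
  ⟨h1.1.trans h2.1, fun i => (h1.2 i).trans (h2.2 i)⟩

theorem getD_set_row (fm : List (List (List String))) (y i : Nat) (r : List (List String)) :
    ((fm.set y r).getD i []) = if y = i ∧ y < fm.length then r else fm.getD i [] := by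
  by_cases hyi : y = i
  · subst hyi
    by_cases hyl : y < fm.length
    · simp [List.getD_eq_getElem?_getD, List.getElem?_set_self hyl, hyl]
    · rw [List.set_eq_of_length_le (by omega)]
      simp [hyl]
  · simp [List.getD_eq_getElem?_getD, List.getElem?_set_ne hyi, hyi]

theorem lens_appendAt (fm : List (List (List String))) (y x : Nat) (d : String) :
    Lens (appendAt fm y x d) fm := by
  constructor
  · simp [appendAt]
  · intro i
    unfold appendAt
    rw [getD_set_row]
    split_ifs with h
    · obtain ⟨rfl, _⟩ := h
      simp [List.length_set]
    · rfl

theorem cell_appendAt_self (fm : List (List (List String))) (y x : Nat) (d : String)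
    (hy : y < fm.length) (hx : x < (fm.getD y []).length) :
    cellAt (appendAt fm y x d) y x = cellAt fm y x ++ [d] := by
  unfold cellAt appendAt
  rw [getD_set_row, if_pos ⟨rfl, hy⟩]
  have hx' : x < (fm[y]?.getD []).length := by
    simpa [List.getD_eq_getElem?_getD] using hx
  simp only [List.getD_eq_getElem?_getD]
  rw [List.getElem?_set_self hx']
  rfl

theorem cell_appendAt_of_ne (fm : List (List (List String))) (y x : Nat) (d : String) (i j : Nat)
    (h : ¬(y = i ∧ x = j ∧ y < fm.length ∧ x < (fm.getD y []).length)) :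
    cellAt (appendAt fm y x d) i j = cellAt fm i j := by
  unfold cellAt appendAt
  rw [getD_set_row]
  split_ifs with hcase
  · obtain ⟨rfl, hl⟩ := hcase
    by_cases hxj : x = j
    · subst hxj
      have hxlen : ¬ x < (fm.getD y []).length := by tauto
      rw [List.set_eq_of_length_le (by omega)]
    · simp [List.getD_eq_getElem?_getD, List.getElem?_set_ne hxj]
  · rfl

theorem cell_appendAt_cases (fm : List (List (List String))) (y x : Nat) (d : String) (i j : Nat) :
    cellAt (appendAt fm y x d) i j = cellAt fm i j ∨
      (i = y ∧ j = x ∧ y < fm.length ∧ x < (fm.getD y []).length ∧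
        cellAt (appendAt fm y x d) i j = cellAt fm i j ++ [d]) := by
  by_cases h : y = i ∧ x = j ∧ y < fm.length ∧ x < (fm.getD y []).length
  · obtain ⟨rfl, rfl, hy, hx⟩ := h
    exact Or.inr ⟨rfl, rfl, hy, hx, cell_appendAt_self fm y x d hy hx⟩
  · exact Or.inl (cell_appendAt_of_ne fm y x d i j h)

theorem missing_term_le (c : List String) (d e : String) :
    (if e ∈ c ++ [d] then 0 else 1) ≤ (if e ∈ c then 0 else 1) := by
  split_ifs with h1 h2 <;> simp_all [List.mem_append]

theorem missing_append_le (c : List String) (d : String) : missing (c ++ [d]) ≤ missing c := by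
  unfold missing
  have := missing_term_le c d
  exact Nat.add_le_add (Nat.add_le_add (Nat.add_le_add (this "S") (this "N")) (this "W")) (this "E")

theorem dirStep?_ne_none_iff (d : String) :
    dirStep? d ≠ none ↔ d = "S" ∨ d = "N" ∨ d = "W" ∨ d = "E" := by
  rw [Ne, dirStep?_none_iff]; tauto

theorem missing_append_lt {c : List String} {d : String} (hd : dirStep? d ≠ none) (hc : d ∉ c) :
    missing (c ++ [d]) < missing c := by
  have h1 := missing_term_le c d "S"
  have h2 := missing_term_le c d "N"
  have h3 := missing_term_le c d "W"
  have h4 := missing_term_le c d "E"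
  have hself : (if d ∈ c ++ [d] then 0 else 1) = 0 := by simp
  have hout : (if d ∈ c then 0 else 1) = 1 := by simp [hc]
  rcases (dirStep?_ne_none_iff d).mp hd with rfl | rfl | rfl | rfl <;> (unfold missing; omega)

theorem missing_append_eq {c : List String} {d : String} (hd : dirStep? d = none) :
    missing (c ++ [d]) = missing c := by
  rw [dirStep?_none_iff] at hd
  obtain ⟨h1, h2, h3, h4⟩ := hd
  unfold missing
  simp [List.mem_append, Ne.symm h1, Ne.symm h2, Ne.symm h3, Ne.symm h4]

theorem len_appendAt (fm : List (List (List String))) (y x : Nat) (d : String) :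
    (appendAt fm y x d).length = fm.length := by
  simp [appendAt]

theorem mu_appendAt_le (fm : List (List (List String))) (y x : Nat) (d : String) :
    mu (appendAt fm y x d) ≤ mu fm := by
  unfold mu
  rw [len_appendAt]
  refine Finset.sum_le_sum fun i _ => ?_
  rw [(lens_appendAt fm y x d).2 i]
  refine Finset.sum_le_sum fun j _ => ?_
  rcases cell_appendAt_cases fm y x d i j with h | h
  · rw [h]
  · rw [h.2.2.2.2]; exact missing_append_le _ _

theorem mu_appendAt_lt (fm : List (List (List String))) (y x : Nat) (d : String)
    (hy : y < fm.length) (hx : x < (fm.getD y []).length)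
    (hd : dirStep? d ≠ none) (hc : d ∉ cellAt fm y x) :
    mu (appendAt fm y x d) < mu fm := by
  unfold mu
  rw [len_appendAt]
  refine Finset.sum_lt_sum (fun i _ => ?_) ⟨y, Finset.mem_range.mpr hy, ?_⟩
  · rw [(lens_appendAt fm y x d).2 i]
    refine Finset.sum_le_sum fun j _ => ?_
    rcases cell_appendAt_cases fm y x d i j with h | h
    · rw [h]
    · rw [h.2.2.2.2]; exact missing_append_le _ _
  · rw [(lens_appendAt fm y x d).2 y]
    refine Finset.sum_lt_sum (fun j _ => ?_) ⟨x, Finset.mem_range.mpr hx, ?_⟩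
    · rcases cell_appendAt_cases fm y x d y j with h | h
      · rw [h]
      · rw [h.2.2.2.2]; exact missing_append_le _ _
    · rw [cell_appendAt_self fm y x d hy hx]
      exact missing_append_lt hd hc

theorem mu_appendAt_eq (fm : List (List (List String))) (y x : Nat) (d : String)
    (hd : dirStep? d = none) : mu (appendAt fm y x d) = mu fm := by
  unfold mu
  rw [len_appendAt]
  refine Finset.sum_congr rfl fun i _ => ?_
  rw [(lens_appendAt fm y x d).2 i]
  refine Finset.sum_congr rfl fun j _ => ?_
  rcases cell_appendAt_cases fm y x d i j with h | h
  · rw [h]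
  · rw [h.2.2.2.2]; exact missing_append_eq hd

theorem lens_igniteF (fuel : Nat) :
    (∀ m fm x y d, Lens (igniteF fuel m fm x y d) fm) ∧
    (∀ m l fm x y, Lens (igniteList fuel m l fm x y) fm) := by
  induction fuel with
  | zero =>
    have hgo : ∀ m fm x y d, Lens (igniteF 0 m fm x y d) fm := by
      intro m fm x y d; rw [go_zero]; exact lens_refl fm
    have hlist : ∀ m (l : List String) fm x y, Lens (igniteList 0 m l fm x y) fm := by
      intro m l
      induction l with
      | nil => intro fm x y; rw [ilist_nil]; exact lens_refl fm
      | cons nd rest ih =>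
        intro fm x y
        rw [igniteList]
        cases h : dirStep? nd with
        | none => simp only [h]; exact ih fm x y
        | some s =>
          simp only [h]
          exact lens_trans (ih (igniteF 0 m fm (x + s.1) (y + s.2) nd) x y)
            (hgo m fm (x + s.1) (y + s.2) nd)
    exact ⟨hgo, hlist⟩
  | succ fuel ih =>
    have hgo : ∀ m fm x y d, Lens (igniteF (fuel + 1) m fm x y d) fm := by
      intro m fm x y d
      rw [igniteF]
      split_ifs with hb
      · exact lens_refl fm
      · exact lens_trans (ih.2 m _ _ x y) (lens_appendAt fm y.toNat x.toNat d)
    have hlist : ∀ m (l : List String) fm x y, Lens (igniteList (fuel + 1) m l fm x y) fm := by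
      intro m l
      induction l with
      | nil => intro fm x y; rw [ilist_nil]; exact lens_refl fm
      | cons nd rest ihl =>
        intro fm x y
        rw [igniteList]
        cases h : dirStep? nd with
        | none => simp only [h]; exact ihl fm x y
        | some s =>
          simp only [h]
          exact lens_trans (ihl (igniteF (fuel + 1) m fm (x + s.1) (y + s.2) nd) x y)
            (hgo m fm (x + s.1) (y + s.2) nd)
    exact ⟨hgo, hlist⟩

theorem shape_of_lens {m : List (List String)} {a b : List (List (List String))}
    (hl : Lens a b) (hs : Shape m b) : Shape m a :=
  ⟨hl.1 ▸ hs.1, fun i hi => (hl.2 i) ▸ hs.2 i hi⟩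

theorem mu_run_le (fuel : Nat) :
    (∀ m fm x y d, mu (igniteF fuel m fm x y d) ≤ mu fm) ∧
    (∀ m l fm x y, mu (igniteList fuel m l fm x y) ≤ mu fm) := by
  induction fuel with
  | zero =>
    have hgo : ∀ m fm x y d, mu (igniteF 0 m fm x y d) ≤ mu fm := by
      intro m fm x y d; rw [go_zero]
    have hlist : ∀ m (l : List String) fm x y, mu (igniteList 0 m l fm x y) ≤ mu fm := by
      intro m l
      induction l with
      | nil => intro fm x y; rw [ilist_nil]
      | cons nd rest ih =>
        intro fm x y
        rw [igniteList]
        cases h : dirStep? nd with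
        | none => simp only [h]; exact ih fm x y
        | some s =>
          simp only [h]
          exact le_trans (ih (igniteF 0 m fm (x + s.1) (y + s.2) nd) x y)
            (hgo m fm (x + s.1) (y + s.2) nd)
    exact ⟨hgo, hlist⟩
  | succ fuel ih =>
    have hgo : ∀ m fm x y d, mu (igniteF (fuel + 1) m fm x y d) ≤ mu fm := by
      intro m fm x y d
      rw [igniteF]
      split_ifs with hb
      · exact le_refl (mu fm)
      · exact le_trans (ih.2 m _ _ x y) (mu_appendAt_le fm y.toNat x.toNat d)
    have hlist : ∀ m (l : List String) fm x y, mu (igniteList (fuel + 1) m l fm x y) ≤ mu fm := by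
      intro m l
      induction l with
      | nil => intro fm x y; rw [ilist_nil]
      | cons nd rest ihl =>
        intro fm x y
        rw [igniteList]
        cases h : dirStep? nd with
        | none => simp only [h]; exact ihl fm x y
        | some s =>
          simp only [h]
          exact le_trans (ihl (igniteF (fuel + 1) m fm (x + s.1) (y + s.2) nd) x y)
            (hgo m fm (x + s.1) (y + s.2) nd)
    exact ⟨hgo, hlist⟩

theorem not_blocked {m : List (List String)} {fm : List (List (List String))} {x y : Int} {d : String}
    (h : ¬ blocked m fm x y d = true) :
    0 ≤ y ∧ y < (m.length : Int) ∧ 0 ≤ x ∧ x < ((m.getD y.toNat []).length : Int) ∧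
      d ∉ cellAt fm y.toNat x.toNat := by
  simp only [blocked, Bool.or_eq_true, decide_eq_true_eq, not_or] at h
  push_neg at h
  exact ⟨by omega, by omega, by omega, by omega, by tauto⟩

theorem stab (fuel : Nat) :
    (∀ m fm x y d, Shape m fm → mu fm + 1 ≤ fuel →
      igniteF (fuel + 1) m fm x y d = igniteF fuel m fm x y d) ∧
    (∀ m l fm x y, Shape m fm → mu fm + 1 ≤ fuel →
      igniteList (fuel + 1) m l fm x y = igniteList fuel m l fm x y) := by
  induction fuel using Nat.strong_induction_on with
  | _ fuel IH =>
    have hgo : ∀ m fm x y d, Shape m fm → mu fm + 1 ≤ fuel →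
        igniteF (fuel + 1) m fm x y d = igniteF fuel m fm x y d := by
      intro m fm x y d hs hf
      obtain ⟨f, rfl⟩ : ∃ f, fuel = f + 1 := ⟨fuel - 1, by omega⟩
      rw [igniteF, igniteF]
      by_cases hb : blocked m fm x y d
      · simp [hb]
      · simp only [hb, if_false]
        obtain ⟨h0y, hylt, h0x, hxlt, hmem⟩ := not_blocked hb
        by_cases hd : dirStep? d = none
        · rw [dead_ilist (f + 1) m _ _ x y (dead_next hd (symAt m y.toNat x.toNat)),
            dead_ilist f m _ _ x y (dead_next hd (symAt m y.toNat x.toNat))]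
        · have hylen : y.toNat < fm.length := lt_of_lt_of_le (by omega) hs.1
          have hxlen : x.toNat < (fm.getD y.toNat []).length :=
            lt_of_lt_of_le (by omega) (hs.2 y.toNat (by omega))
          have hlt := mu_appendAt_lt fm y.toNat x.toNat d hylen hxlen hd hmem
          have hstep := (IH f (by omega)).2 m (identifyNext (symAt m y.toNat x.toNat) d)
            (appendAt fm y.toNat x.toNat d) x y
            (shape_of_lens (lens_appendAt fm y.toNat x.toNat d) hs) (by omega)
          exact hstep
    have hlist : ∀ m (l : List String) fm x y, Shape m fm → mu fm + 1 ≤ fuel →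
        igniteList (fuel + 1) m l fm x y = igniteList fuel m l fm x y := by
      intro m l
      induction l with
      | nil => intro fm x y _ _; rw [ilist_nil, ilist_nil]
      | cons nd rest ihl =>
        intro fm x y hs hf
        rw [igniteList, igniteList]
        cases h : dirStep? nd with
        | none => simp only [h]; exact ihl fm x y hs hf
        | some s =>
          simp only [h]
          rw [hgo m fm (x + s.1) (y + s.2) nd hs hf]
          have hlens := (lens_igniteF fuel).1 m fm (x + s.1) (y + s.2) nd
          have hmu := (mu_run_le fuel).1 m fm (x + s.1) (y + s.2) nd
          exact ihl (igniteF fuel m fm (x + s.1) (y + s.2) nd) x y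
            (shape_of_lens hlens hs) (by omega)
    exact ⟨hgo, hlist⟩

theorem stab_go_ge (f1 f2 : Nat) (m : List (List String)) (fm : List (List (List String)))
    (x y : Int) (d : String) (hs : Shape m fm) (h1 : mu fm + 1 ≤ f1) (h2 : mu fm + 1 ≤ f2) :
    igniteF f1 m fm x y d = igniteF f2 m fm x y d := by
  have add : ∀ k f, mu fm + 1 ≤ f → igniteF (f + k) m fm x y d = igniteF f m fm x y d := by
    intro k
    induction k with
    | zero => intro f _; rfl
    | succ k ihk =>
      intro f hf
      rw [show f + (k + 1) = (f + k) + 1 from rfl, (stab (f + k)).1 m fm x y d hs (by omega),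
        ihk f hf]
  rcases le_total f1 f2 with h | h
  · rw [show f2 = f1 + (f2 - f1) by omega, add (f2 - f1) f1 h1]
  · rw [show f1 = f2 + (f1 - f2) by omega, add (f1 - f2) f2 h2]

theorem loop_cons (f : Nat) (m : List (List String)) (x y : Int) (d : String)
    (rest : List (Int × Int × String)) (fm : List (List (List String))) :
    igniteLoop (f + 1) m ((x, y, d) :: rest) fm =
      if blocked m fm x y d then igniteLoop f m rest fm
      else igniteLoop f m (statesOf (identifyNext (symAt m y.toNat x.toNat) d) x y ++ rest)
        (appendAt fm y.toNat x.toNat d) := by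
  rfl

theorem stabL (fuel : Nat) :
    ∀ m stack fm, Shape m fm → stack.length + 2 * mu fm ≤ fuel →
      igniteLoop (fuel + 1) m stack fm = igniteLoop fuel m stack fm := by
  induction fuel using Nat.strong_induction_on with
  | _ fuel IH =>
    intro m stack fm hs hb
    rcases stack with _ | ⟨⟨x, y, d⟩, rest⟩
    · rw [loop_nil, loop_nil]
    · have h1 : rest.length + 1 + 2 * mu fm ≤ fuel := by
        simpa [List.length_cons] using hb
      obtain ⟨f, rfl⟩ : ∃ f, fuel = f + 1 := ⟨fuel - 1, by omega⟩
      rw [loop_cons, loop_cons]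
      by_cases hbl : blocked m fm x y d
      · simp only [hbl, if_true]
        exact IH f (by omega) m rest fm hs (by omega)
      · simp only [hbl, if_false]
        obtain ⟨h0y, hylt, h0x, hxlt, hmem⟩ := not_blocked hbl
        have hsh' : Shape m (appendAt fm y.toNat x.toNat d) :=
          shape_of_lens (lens_appendAt fm y.toNat x.toNat d) hs
        have hslen : (statesOf (identifyNext (symAt m y.toNat x.toNat) d) x y).length ≤ 2 :=
          le_trans (statesOf_len _ x y) (identifyNext_len _ _)
        by_cases hd : dirStep? d = none
        · rw [dead_states _ _ _ (dead_next hd (symAt m y.toNat x.toNat)), List.nil_append]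
          exact IH f (by omega) m rest _ hsh'
            (by rw [mu_appendAt_eq fm y.toNat x.toNat d hd]; omega)
        · have hylen : y.toNat < fm.length := lt_of_lt_of_le (by omega) hs.1
          have hxlen : x.toNat < (fm.getD y.toNat []).length :=
            lt_of_lt_of_le (by omega) (hs.2 y.toNat (by omega))
          have hlt := mu_appendAt_lt fm y.toNat x.toNat d hylen hxlen hd hmem
          exact IH f (by omega) m _ _ hsh'
            (by simp only [List.length_append]; omega)

theorem stabL_ge (f1 f2 : Nat) (m : List (List String)) (stack : List (Int × Int × String))
    (fm : List (List (List String))) (hs : Shape m fm)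
    (h1 : stack.length + 2 * mu fm ≤ f1) (h2 : stack.length + 2 * mu fm ≤ f2) :
    igniteLoop f1 m stack fm = igniteLoop f2 m stack fm := by
  have add : ∀ k f, stack.length + 2 * mu fm ≤ f →
      igniteLoop (f + k) m stack fm = igniteLoop f m stack fm := by
    intro k
    induction k with
    | zero => intro f _; rfl
    | succ k ihk =>
      intro f hf
      rw [show f + (k + 1) = (f + k) + 1 from rfl, stabL (f + k) m stack fm hs (by omega),
        ihk f hf]
  rcases le_total f1 f2 with h | h
  · rw [show f2 = f1 + (f2 - f1) by omega, add (f2 - f1) f1 h1]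
  · rw [show f1 = f2 + (f1 - f2) by omega, add (f1 - f2) f2 h2]

theorem LB : ∀ n m fm, Shape m fm → mu fm ≤ n → ∀ x y d rest,
    Lloop m ((x, y, d) :: rest) fm = Lloop m rest (R m fm x y d) := by
  intro n
  induction n using Nat.strong_induction_on with
  | _ n IH =>
    intro m fm hs hn x y d rest
    unfold Lloop R
    rw [show ((x, y, d) :: rest).length + 2 * mu fm = (rest.length + 2 * mu fm) + 1 by
      simp [List.length_cons]; omega]
    rw [loop_cons]
    by_cases hb : blocked m fm x y d
    · simp only [hb, if_true]
      rw [igniteF]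
      simp [hb]
    · simp only [hb, Bool.false_eq_true, if_false]
      rw [igniteF]
      simp only [hb, Bool.false_eq_true, if_false]
      obtain ⟨h0y, hylt, h0x, hxlt, hmem⟩ := not_blocked hb
      have hsh' : Shape m (appendAt fm y.toNat x.toNat d) :=
        shape_of_lens (lens_appendAt fm y.toNat x.toNat d) hs
      by_cases hd : dirStep? d = none
      · rw [dead_states _ _ _ (dead_next hd (symAt m y.toNat x.toNat)),
          dead_ilist (mu fm) m _ _ x y (dead_next hd (symAt m y.toNat x.toNat)),
          List.nil_append]
        rw [show mu fm = mu (appendAt fm y.toNat x.toNat d) from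
          (mu_appendAt_eq fm y.toNat x.toNat d hd).symm]
      · have hylen : y.toNat < fm.length := lt_of_lt_of_le (by omega) hs.1
        have hxlen : x.toNat < (fm.getD y.toNat []).length :=
          lt_of_lt_of_le (by omega) (hs.2 y.toNat (by omega))
        have hlt : mu (appendAt fm y.toNat x.toNat d) < mu fm :=
          mu_appendAt_lt fm y.toNat x.toNat d hylen hxlen hd hmem
        have inner : ∀ (l : List String) (fmc : List (List (List String)))
            (rest' : List (Int × Int × String)) (g : Nat),
            Shape m fmc → mu fmc < n → mu fmc + 1 ≤ g →
            igniteLoop ((statesOf l x y ++ rest').length + 2 * mu fmc) m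
                (statesOf l x y ++ rest') fmc
              = igniteLoop (rest'.length + 2 * mu (igniteList g m l fmc x y)) m rest'
                (igniteList g m l fmc x y) := by
          intro l
          induction l with
          | nil =>
            intro fmc rest' g _ _ _
            rw [show statesOf [] x y = [] from rfl, List.nil_append, ilist_nil g m fmc x y]
          | cons nd t ihl =>
            intro fmc rest' g hsc hmu hg
            cases hnd : dirStep? nd with
            | none =>
              rw [show statesOf (nd :: t) x y = statesOf t x y from by simp [statesOf, hnd]]
              rw [igniteList]
              simp only [hnd]
              exact ihl fmc rest' g hsc hmu hg
            | some s =>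
              rw [show statesOf (nd :: t) x y = (x + s.1, y + s.2, nd) :: statesOf t x y from by
                simp [statesOf, hnd]]
              rw [List.cons_append]
              have hout := IH (mu fmc) (by omega) m fmc hsc (le_refl (mu fmc)) (x + s.1)
                (y + s.2) nd (statesOf t x y ++ rest')
              unfold Lloop R at hout
              rw [hout]
              rw [igniteList]
              simp only [hnd]
              rw [stab_go_ge g (mu fmc + 1) m fmc (x + s.1) (y + s.2) nd hsc hg
                (le_refl (mu fmc + 1))]
              have hlens := (lens_igniteF (mu fmc + 1)).1 m fmc (x + s.1) (y + s.2) nd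
              have hmu2 := (mu_run_le (mu fmc + 1)).1 m fmc (x + s.1) (y + s.2) nd
              exact ihl (igniteF (mu fmc + 1) m fmc (x + s.1) (y + s.2) nd) rest' g
                (shape_of_lens hlens hsc) (by omega) (by omega)
        have hslen : (statesOf (identifyNext (symAt m y.toNat x.toNat) d) x y).length ≤ 2 :=
          le_trans (statesOf_len _ x y) (identifyNext_len _ _)
        rw [stabL_ge (rest.length + 2 * mu fm)
          ((statesOf (identifyNext (symAt m y.toNat x.toNat) d) x y ++ rest).length
            + 2 * mu (appendAt fm y.toNat x.toNat d)) m _ _ hsh'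
          (by simp only [List.length_append]; omega)
          (le_refl _)]
        exact inner (identifyNext (symAt m y.toNat x.toNat) d) (appendAt fm y.toNat x.toNat d)
          rest (mu fm) hsh' (by omega) (by omega)

-- ===== bridges between B's port and the reference loop =====

theorem stepB_get (d : String) : PySem.Dict.get? stepB d = dirStep? d := by
  by_cases hS : d = "S"
  · subst hS; decide
  by_cases hN : d = "N"
  · subst hN; decide
  by_cases hW : d = "W"
  · subst hW; decide
  by_cases hE : d = "E"
  · subst hE; decide
  unfold stepB dirStep?
  simp [Ne.symm hS, Ne.symm hN, Ne.symm hW, Ne.symm hE, hS, hN, hW, hE, PySem.Dict.get?]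

theorem tableB_miss (s d : String) (hS : d ≠ "S") (hN : d ≠ "N") (hW : d ≠ "W") (hE : d ≠ "E") :
    PySem.Dict.getD tableB (s, d) [] = [] := by
  unfold tableB
  simp [PySem.Dict.getD, PySem.Dict.get?, Prod.ext_iff,
    Ne.symm hS, Ne.symm hN, Ne.symm hW, Ne.symm hE, hS, hN, hW, hE]

theorem tableB_other (s d : String) (h1 : s ≠ ".") (h2 : s ≠ "\\") (h3 : s ≠ "/")
    (h4 : s ≠ "|") (h5 : s ≠ "-") : PySem.Dict.getD tableB (s, d) [] = [] := by
  unfold tableB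
  simp [PySem.Dict.getD, PySem.Dict.get?, Prod.ext_iff,
    Ne.symm h2, Ne.symm h3, Ne.symm h4, Ne.symm h5]

theorem nextDirs_eq (s d : String) : nextDirs s d = identifyNext s d := by
  by_cases h1 : s = "."
  · subst h1; simp [nextDirs, identifyNext]
  by_cases hd : d = "S" ∨ d = "N" ∨ d = "W" ∨ d = "E"
  · by_cases h2 : s = "\\"
    · subst h2; rcases hd with rfl | rfl | rfl | rfl <;> decide
    by_cases h3 : s = "/"
    · subst h3; rcases hd with rfl | rfl | rfl | rfl <;> decide
    by_cases h4 : s = "|"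
    · subst h4; rcases hd with rfl | rfl | rfl | rfl <;> decide
    by_cases h5 : s = "-"
    · subst h5; rcases hd with rfl | rfl | rfl | rfl <;> decide
    · unfold nextDirs identifyNext
      rw [if_neg h1, tableB_other s d h1 h2 h3 h4 h5]
      simp [h1, h2, h3, h4, h5]
  · push_neg at hd
    obtain ⟨hS, hN, hW, hE⟩ := hd
    unfold nextDirs identifyNext
    rw [if_neg h1, tableB_miss s d hS hN hW hE]
    split_ifs <;> simp_all

theorem mapIdx_set_cell (r : List (List String)) (x : Nat) (d : String) :
    r.mapIdx (fun j c => if j = x then c ++ [d] else c) = r.set x (r.getD x [] ++ [d]) := by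
  apply List.ext_getElem
  · simp
  · intro j hj hj2
    rw [List.getElem_mapIdx, List.getElem_set]
    by_cases hjx : j = x
    · subst hjx
      rw [if_pos rfl, if_pos rfl]
      congr 1
      rw [List.getD_eq_getElem?_getD, List.getElem?_eq_getElem (by simpa using hj)]
      rfl
    · rw [if_neg hjx, if_neg (fun h => hjx h.symm)]

theorem mapIdx_update (fm : List (List (List String))) (y x : Nat) (d : String) :
    (fm.mapIdx (fun i row => if i = y then
        row.mapIdx (fun j c => if j = x then c ++ [d] else c) else row))
      = appendAt fm y x d := by
  unfold appendAt cellAt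
  apply List.ext_getElem
  · simp
  · intro i hi hi2
    rw [List.getElem_mapIdx, List.getElem_set]
    by_cases hiy : i = y
    · subst hiy
      rw [if_pos rfl, if_pos rfl, mapIdx_set_cell]
      have hrow : fm.getD i [] = fm[i]'(by simpa using hi) := by
        rw [List.getD_eq_getElem?_getD, List.getElem?_eq_getElem (by simpa using hi)]
        rfl
      rw [hrow]
    · rw [if_neg hiy, if_neg (fun h => hiy h.symm)]

theorem guard_iff (m : List (List String)) (fm : List (List (List String))) (x y : Int) (d : String) :
    (0 ≤ y ∧ y < (m.length : Int) ∧ 0 ≤ x ∧ x < ((m.getD y.toNat []).length : Int)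
        ∧ d ∉ (fm.getD y.toNat []).getD x.toNat []) ↔ blocked m fm x y d = false := by
  simp only [blocked, cellAt, Bool.or_eq_false_iff, decide_eq_false_iff_not, not_lt, not_le]
  constructor
  · rintro ⟨h1, h2, h3, h4, h5⟩; exact ⟨⟨⟨⟨h1, by omega⟩, h3⟩, by omega⟩, h5⟩
  · rintro ⟨⟨⟨⟨h1, h2⟩, h3⟩, h4⟩, h5⟩; exact ⟨h1, by omega, h3, by omega, h5⟩

theorem go_eq_loop : ∀ (f : Nat) (m : List (List String)) (st : List (Int × Int × String))
    (fm : List (List (List String))), igniteGo f m st fm = igniteLoop f m st fm := by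
  intro f
  induction f with
  | zero => intro m st fm; rfl
  | succ f ih =>
    intro m st fm
    rcases st with _ | ⟨⟨x, y, d⟩, rest⟩
    · rfl
    · rw [igniteGo, igniteLoop]
      by_cases hb : blocked m fm x y d
      · rw [if_neg (by rw [guard_iff]; simp [hb]), if_pos hb, ih]
      · rw [if_pos ((guard_iff m fm x y d).mpr (by simp [hb])), if_neg hb]
        simp only [stepB_get, nextDirs_eq, mapIdx_update]
        exact ih m _ _

theorem missing_le_four (c : List String) : missing c ≤ 4 := by
  unfold missing; split_ifs <;> omega

theorem sum_map_len (fm : List (List (List String))) :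
    (fm.map (fun r => r.length)).sum = ∑ i ∈ Finset.range fm.length, (fm.getD i []).length := by
  induction fm with
  | nil => simp
  | cons r t ih =>
    rw [List.map_cons, List.sum_cons, List.length_cons, Finset.sum_range_succ']
    simp only [List.getD_cons_succ, List.getD_cons_zero]
    rw [ih]; omega

theorem mu_le_cells (fm : List (List (List String))) :
    mu fm ≤ 4 * (fm.map (fun r => r.length)).sum := by
  rw [sum_map_len, Finset.mul_sum]
  unfold mu
  refine Finset.sum_le_sum fun i _ => ?_
  calc ∑ j ∈ Finset.range (fm.getD i []).length, missing (cellAt fm i j)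
      ≤ ∑ j ∈ Finset.range (fm.getD i []).length, 4 :=
        Finset.sum_le_sum fun j _ => missing_le_four _
    _ = 4 * (fm.getD i []).length := by simp [Finset.sum_const, Nat.mul_comm]

theorem ignite_spec_core (m : List (List String)) (fm : List (List (List String)))
    (x y : Int) (d : String)
    (hpre : Pre_ignite m fm x y d) :
    ignite m fm x y d = ignite_alt m fm x y d := by
  unfold ignite ignite_alt
  rw [go_eq_loop]
  by_cases hin : inStart m x y
  · obtain ⟨hsh, -⟩ := hpre hin
    have hmu : mu fm ≤ 4 * (fm.map (fun r => r.length)).sum := mu_le_cells fm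
    rw [stabL_ge (1 + 8 * (fm.map (fun r => r.length)).sum) (1 + 2 * mu fm) m
      [(x, y, d)] fm hsh (by simp; omega) (by simp)]
    have h1 : igniteLoop (1 + 2 * mu fm) m [(x, y, d)] fm = Lloop m [(x, y, d)] fm := by
      unfold Lloop; norm_num
    rw [h1, LB (mu fm) m fm hsh (le_refl (mu fm)) x y d []]
    unfold Lloop
    rw [loop_nil]
    rfl
  · have hbl : blocked m fm x y d = true := by
      simp only [blocked, Bool.or_eq_true, decide_eq_true_eq]
      unfold inStart at hin
      push_neg at hin
      rcases lt_or_ge y 0 with h1 | h1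
      · exact Or.inl (Or.inl (Or.inl (Or.inl h1)))
      rcases (lt_or_ge y (m.length : Int)).symm with h2 | h2
      · exact Or.inl (Or.inl (Or.inl (Or.inr h2)))
      rcases lt_or_ge x 0 with h3 | h3
      · exact Or.inl (Or.inl (Or.inr h3))
      exact Or.inl (Or.inr (hin (by omega) (by omega) (by omega)))
    have hA : igniteF (mu fm + 1) m fm x y d = fm := by
      rw [igniteF]; simp [hbl]
    have hB : igniteLoop (1 + 8 * (fm.map (fun r => r.length)).sum) m [(x, y, d)] fm = fm := by
      rw [show 1 + 8 * (fm.map (fun r => r.length)).sum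
          = (8 * (fm.map (fun r => r.length)).sum) + 1 by omega, loop_cons]
      simp [hbl, loop_nil]
    rw [hA, hB]

-- ===== VERDICT (by name: the statement is the Claim_ definition above) =====
theorem ignite_spec : Claim_equal_ignite := by
  intro matrix final_matrix pos_x pos_y direction _ hpre
  unfold Spec_ignite
  exact ignite_spec_core matrix final_matrix pos_x pos_y direction hpre
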